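-- pv_equiv track=rewrite | github.com/Stisat/PythonCourse | HW20/main.py | SumPoint
-- ===== SOURCE A (Python) =====
-- def SumPoint(t, dict):
--     t=t.upper()
--     point = 0
--     col = []
--     for i in dict:
--         col.append(i)
--     for j in range(len(col)):
--         for l in col[j]:
--             for h in range(len(t)):
--                 if t[h]==l:
--                     point = point + dict[col[j]]
--     return point
-- ===== SOURCE B (Python) =====
-- def SumPoint(t, dict):
--     # Build a per-letter weight table once, then one pass over the string.
--     weight = {}
--     for key in dict:
--         v = dict[key]
--         for ch in key:
--             weight[ch] = weight.get(ch, 0) + v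
--     point = 0
--     for ch in t.upper():
--         point += weight.get(ch, 0)
--     return point
-- ===== Notes on version B (the rewrite author's own statement) =====
-- stated objective: faster
-- what changed: Replaces the triple nested scan (every letter of every key compared against every position of t) by building a letter->weight table in one pass over the keys and then a single accumulating pass over t.upper().
import Mathlib
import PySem

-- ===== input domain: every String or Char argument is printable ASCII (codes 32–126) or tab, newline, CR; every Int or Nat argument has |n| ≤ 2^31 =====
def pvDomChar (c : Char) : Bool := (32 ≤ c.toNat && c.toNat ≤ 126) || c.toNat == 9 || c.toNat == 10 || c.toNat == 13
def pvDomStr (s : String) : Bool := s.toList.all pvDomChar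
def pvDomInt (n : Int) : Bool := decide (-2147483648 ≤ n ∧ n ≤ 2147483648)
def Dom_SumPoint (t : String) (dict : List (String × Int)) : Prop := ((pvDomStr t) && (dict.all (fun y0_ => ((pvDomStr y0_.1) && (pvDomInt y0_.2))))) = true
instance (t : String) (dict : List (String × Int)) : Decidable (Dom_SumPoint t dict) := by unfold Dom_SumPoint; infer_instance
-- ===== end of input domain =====

-- B builds a letter->weight table once, then makes a single pass over t.upper(); one honest line: same result, no triple nested scan.

-- ===== PORT A =====
def SumPoint (t : String) (dict : List (String × Int)) : Int :=
  -- t = t.upper()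
  let T : List Char := (PySem.Str.upper t).toList
  -- col = []; for i in dict: col.append(i)   (iterating a dict yields its keys)
  let col : List String := dict.foldl (fun col i => col ++ [i.1]) []
  -- for j in range(len(col)): for l in col[j]: for h in range(len(t)): if t[h]==l: point += dict[col[j]]
  (PySem.List.pyRange 0 (col.length : Int) 1).foldl (fun point j =>
    let kj := PySem.List.pyGetD col j ""
    kj.toList.foldl (fun point l =>
      (PySem.List.pyRange 0 (T.length : Int) 1).foldl (fun point h =>
        if PySem.List.pyGetD T h ' ' == l then
          point + (PySem.Dict.mk dict).getD kj 0
        else point) point) point) 0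

-- ===== PORT B =====
def SumPoint_alt (t : String) (dict : List (String × Int)) : Int :=
  -- weight = {}; for key in dict: v = dict[key]; for ch in key: weight[ch] = weight.get(ch,0) + v
  let w : PySem.Dict Char Int := dict.foldl (fun w p =>
      let v := (PySem.Dict.mk dict).getD p.1 0
      p.1.toList.foldl (fun w ch => w.insert ch (w.getD ch 0 + v)) w)
    PySem.Dict.empty
  -- point = 0; for ch in t.upper(): point += weight.get(ch, 0)
  (PySem.Str.upper t).toList.foldl (fun point ch => point + w.getD ch 0) 0

-- ===== PRECONDITION & SPEC =====
def Spec_SumPoint (t : String) (dict : List (String × Int)) (out : Int) : Prop := out = SumPoint_alt t dict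
instance (t : String) (dict : List (String × Int)) (out : Int) : Decidable (Spec_SumPoint t dict out) := by unfold Spec_SumPoint; infer_instance

-- ===== CLAIM (what is proved, stated in full; the proofs are below) =====
def Claim_equal_SumPoint : Prop := ∀ (t : String) (dict : List (String × Int)), Dom_SumPoint t dict → Spec_SumPoint t dict (SumPoint t dict)

-- ===== LEMMAS AND PROOFS =====

-- innermost loop of A: scanning T for matches of l, adding v each time
theorem pv_inner_loop (T : List Char) (l : Char) (v : Int) (point : Int) :
    T.foldl (fun point c => if c == l then point + v else point) point
      = point + (T.count l : Int) * v := by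
  induction T generalizing point with
  | nil => simp
  | cons c T ih =>
    simp only [List.foldl_cons, List.count_cons, ih]
    by_cases h : c = l
    · simp [h]; ring
    · simp [h]

-- the inner char loop of B's table build
theorem getD_foldl_insert_add_const (cs : List Char) (v : Int) (w : PySem.Dict Char Int) (c : Char) :
    (cs.foldl (fun w ch => w.insert ch (w.getD ch 0 + v)) w).getD c 0
      = w.getD c 0 + (cs.count c : Int) * v := by
  induction cs generalizing w with
  | nil => simp
  | cons a cs ih =>
    simp only [List.foldl_cons, ih, PySem.Dict.getD_insert, List.count_cons]
    by_cases h : c = a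
    · simp [h]; ring
    · simp [h, Ne.symm h]
-- the whole weight table of B, pointwise
theorem getD_weight (l : List (String × Int)) (val : String → Int) (w : PySem.Dict Char Int) (c : Char) :
    (l.foldl (fun w p => p.1.toList.foldl (fun w ch => w.insert ch (w.getD ch 0 + val p.1)) w) w).getD c 0
      = w.getD c 0 + (l.map (fun p => (p.1.toList.count c : Int) * val p.1)).sum := by
  induction l generalizing w with
  | nil => simp
  | cons p l ih =>
    simp only [List.foldl_cons, ih, getD_foldl_insert_add_const, List.map_cons, List.sum_cons]
    ring

-- double counting: Σ_{l∈ks} count T l = Σ_{c∈T} count ks c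
theorem count_ite_sum (T : List Char) (a : Char) :
    (T.map (fun c => if a == c then (1:Int) else 0)).sum = (T.count a : Int) := by
  induction T with
  | nil => simp
  | cons b T ih =>
    simp only [List.map_cons, List.sum_cons, ih, List.count_cons]
    by_cases h : a = b
    · simp [h]; ring
    · simp [h]; exact Ne.symm h

theorem double_count (ks T : List Char) :
    (ks.map (fun l => (T.count l : Int))).sum = (T.map (fun c => (ks.count c : Int))).sum := by
  induction ks with
  | nil => simp
  | cons a ks ih =>
    simp only [List.map_cons, List.sum_cons, ih, List.count_cons]
    have h0 : ∀ c : Char, ((ks.count c + if a == c then 1 else 0 : Nat) : Int)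
        = (ks.count c : Int) + (if a == c then (1:Int) else 0) := by
      intro c; push_cast; split <;> simp
    rw [show (fun c => ((ks.count c + if a == c then 1 else 0 : Nat) : Int))
        = fun c => (ks.count c : Int) + (if a == c then (1:Int) else 0) from funext h0,
      PySem.List.sum_map_add_int, count_ite_sum]
    ring

-- swap of the double sum
theorem sum_swap (l : List (String × Int)) (T : List Char) (val : String → Int) :
    (l.map (fun p => (p.1.toList.map (fun ch => (T.count ch : Int) * val p.1)).sum)).sum
      = (T.map (fun c => (l.map (fun p => (p.1.toList.count c : Int) * val p.1)).sum)).sum := by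
  induction l with
  | nil => simp
  | cons p l ih =>
    simp only [List.map_cons, List.sum_cons, ih]
    have h1 : (T.map (fun c => ((p.1.toList.count c : Int) * val p.1 + (l.map (fun p => (p.1.toList.count c : Int) * val p.1)).sum))).sum
        = (T.map (fun c => (p.1.toList.count c : Int) * val p.1)).sum
          + (T.map (fun c => (l.map (fun p => (p.1.toList.count c : Int) * val p.1)).sum)).sum := by
      rw [← PySem.List.sum_map_add_int]
    rw [h1]
    congr 1
    calc (p.1.toList.map (fun ch => (T.count ch : Int) * val p.1)).sum
        = (p.1.toList.map (fun ch => (T.count ch : Int))).sum * val p.1 := by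
          rw [← List.sum_map_mul_right]
      _ = (T.map (fun c => (p.1.toList.count c : Int))).sum * val p.1 := by rw [double_count]
      _ = (T.map (fun c => (p.1.toList.count c : Int) * val p.1)).sum := by
          rw [← List.sum_map_mul_right]

-- characterization of A as a sum over the dict entries
theorem SumPoint_eq_sum (t : String) (dict : List (String × Int)) :
    SumPoint t dict
      = (dict.map (fun p => (p.1.toList.map (fun l => (((PySem.Str.upper t).toList.count l : Int)) * (PySem.Dict.mk dict).getD p.1 0)).sum)).sum := by
  unfold SumPoint
  simp only [PySem.List.foldl_append_singleton_eq_map, List.nil_append]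
  rw [PySem.List.foldl_pyRange_zero_pyGetD' (dict.map Prod.fst) ""
      (fun point kj => kj.toList.foldl (fun point l =>
        (PySem.List.pyRange 0 (((PySem.Str.upper t).toList.length : Int)) 1).foldl (fun point h =>
          if PySem.List.pyGetD (PySem.Str.upper t).toList h ' ' == l then
            point + (PySem.Dict.mk dict).getD kj 0
          else point) point) point) 0]
  have hbody : ∀ (point : Int) (kj : String),
      kj.toList.foldl (fun point l =>
        (PySem.List.pyRange 0 (((PySem.Str.upper t).toList.length : Int)) 1).foldl (fun point h =>
          if PySem.List.pyGetD (PySem.Str.upper t).toList h ' ' == l then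
            point + (PySem.Dict.mk dict).getD kj 0
          else point) point) point
      = point + (kj.toList.map (fun l => (((PySem.Str.upper t).toList.count l : Int)) * (PySem.Dict.mk dict).getD kj 0)).sum := by
    intro point kj
    have hin : ∀ (point : Int) (l : Char),
        (PySem.List.pyRange 0 (((PySem.Str.upper t).toList.length : Int)) 1).foldl (fun point h =>
          if PySem.List.pyGetD (PySem.Str.upper t).toList h ' ' == l then
            point + (PySem.Dict.mk dict).getD kj 0
          else point) point
        = point + (((PySem.Str.upper t).toList.count l : Int)) * (PySem.Dict.mk dict).getD kj 0 := by
      intro point l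
      rw [PySem.List.foldl_pyRange_zero_pyGetD' (PySem.Str.upper t).toList ' '
          (fun point c => if c == l then point + (PySem.Dict.mk dict).getD kj 0 else point) point]
      exact pv_inner_loop _ _ _ _
    calc kj.toList.foldl _ point
        = kj.toList.foldl (fun point l => point + (((PySem.Str.upper t).toList.count l : Int)) * (PySem.Dict.mk dict).getD kj 0) point := by
          apply PySem.List.foldl_congr_mem
          intro acc l _; exact hin acc l
      _ = point + (kj.toList.map (fun l => (((PySem.Str.upper t).toList.count l : Int)) * (PySem.Dict.mk dict).getD kj 0)).sum := by
          rw [PySem.List.foldl_add]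
  calc (dict.map Prod.fst).foldl _ 0
      = (dict.map Prod.fst).foldl (fun point kj => point + (kj.toList.map (fun l => (((PySem.Str.upper t).toList.count l : Int)) * (PySem.Dict.mk dict).getD kj 0)).sum) 0 := by
        apply PySem.List.foldl_congr_mem
        intro acc kj _; exact hbody acc kj
    _ = _ := by
        rw [PySem.List.foldl_add]
        simp only [List.map_map, zero_add]
        rfl

-- characterization of B as a sum over t.upper()
theorem SumPoint_alt_eq_sum (t : String) (dict : List (String × Int)) :
    SumPoint_alt t dict
      = ((PySem.Str.upper t).toList.map (fun c => (dict.map (fun p => (p.1.toList.count c : Int) * (PySem.Dict.mk dict).getD p.1 0)).sum)).sum := by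
  unfold SumPoint_alt
  rw [PySem.List.foldl_add]
  simp only [zero_add]
  refine congrArg List.sum (List.map_congr_left fun c _ => ?_)
  rw [getD_weight dict (fun k => (PySem.Dict.mk dict).getD k 0) PySem.Dict.empty c]
  simp

-- ===== VERDICT (by name: the statement is the Claim_ definition above) =====
theorem SumPoint_spec : Claim_equal_SumPoint := by
  intro t dict _
  unfold Spec_SumPoint
  rw [SumPoint_eq_sum, SumPoint_alt_eq_sum]
  exact sum_swap dict (PySem.Str.upper t).toList (fun k => (PySem.Dict.mk dict).getD k 0)
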